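-- pv_equiv track=rewrite | github.com/acg-team/tral | tandemrepeats/repeat/repeat_conversation_test.py | pairwise_order_conservation
-- ===== SOURCE A (Python) =====
-- def pairwise_order_conservation(a,b):
--
--     ''' Count how often the order is conserved between pairwise best hits
--      from two homologous tandem repeats A and B.
--
--     Parameters: a: Index of best hit tandem repeat unit in B for each repeat unit in A
--                 b: vice versa.
--
--     E.g. for perfect conservation:
--     a = [0,1,2,3,4,5]
--     b = [0,1,2,3,4,5]
--
--     Direction: from A to B. I.e. For any pair of repeat units in A, can you predict the order
--     of the corresponding best hit repeat units in B?
--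
--     Return the count of
--     - correct predictions ('conserved')
--     - incorrect predictions ('not_conserved')
--     - missing predictions in case of identical references from A to B ('identical')'''
--
--     count = {'conserved': 0, 'identical': 0, 'not_conserved':0}
--
--     for i in range(len(a)):
--         for j in range(i):
--             if a[i] == a[j]:
--                 count['identical'] += 1
--             elif a[i] > a[j]:
--                 count['conserved'] += 1
--             else:
--                 count['not_conserved'] += 1
--
--     return count
-- ===== SOURCE B (Python) =====
-- def pairwise_order_conservation(a, b):
--     '''Merge-sort based re-implementation: count strict inversions ('not_conserved')
--     with a divide-and-conquer merge count, 'identical' with a running value-frequency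
--     dict, and derive 'conserved' as total pairs minus the other two.'''
--
--     def sort_count(xs):
--         # returns (sorted copy of xs, number of pairs j < i with xs[j] > xs[i])
--         n = len(xs)
--         if n <= 1:
--             return xs, 0
--         mid = n // 2
--         left, linv = sort_count(xs[:mid])
--         right, rinv = sort_count(xs[mid:])
--         merged = []
--         cross = 0
--         i = j = 0
--         while i < len(left) and j < len(right):
--             if right[j] < left[i]:
--                 merged.append(right[j])
--                 cross += len(left) - i
--                 j += 1
--             else:
--                 merged.append(left[i])
--                 i += 1
--         merged.extend(left[i:])
--         merged.extend(right[j:])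
--         return merged, linv + rinv + cross
--
--     identical = 0
--     seen = {}
--     for x in a:
--         c = seen.get(x, 0)
--         identical += c
--         seen[x] = c + 1
--
--     n = len(a)
--     _, not_conserved = sort_count(a)
--     conserved = n * (n - 1) // 2 - identical - not_conserved
--     return {'conserved': conserved, 'identical': identical, 'not_conserved': not_conserved}
-- ===== Notes on version B (the rewrite author's own statement) =====
-- stated objective: faster
-- what changed: Replaced the O(n^2) double loop over all ordered pairs with a merge-sort inversion count for 'not_conserved', a one-pass value-frequency dict for 'identical', and 'conserved' derived as n*(n-1)/2 minus the other two.
import Mathlib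
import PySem

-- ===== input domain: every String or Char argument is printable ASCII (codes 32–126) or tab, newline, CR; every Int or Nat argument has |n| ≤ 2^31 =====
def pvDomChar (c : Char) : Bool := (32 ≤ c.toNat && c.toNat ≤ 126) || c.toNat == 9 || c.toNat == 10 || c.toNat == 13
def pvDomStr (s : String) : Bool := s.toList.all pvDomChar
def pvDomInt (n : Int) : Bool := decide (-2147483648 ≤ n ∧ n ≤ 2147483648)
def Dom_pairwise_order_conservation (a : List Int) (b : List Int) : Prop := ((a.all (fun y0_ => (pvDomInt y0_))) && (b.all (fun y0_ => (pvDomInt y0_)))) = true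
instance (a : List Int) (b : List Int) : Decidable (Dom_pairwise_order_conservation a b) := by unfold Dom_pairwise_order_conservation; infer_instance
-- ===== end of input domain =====

-- B replaces A's O(n^2) double loop by a merge-sort inversion count plus a one-pass
-- frequency dict ('identical'), deriving 'conserved' as n*(n-1)//2 minus the other two.


-- ===== PORT A =====
-- Python's dict is ported as an insertion-ordered association list (type convention).
-- `count[k] += 1` always hits one of the three keys present from initialisation, so it
-- is ported as an in-place bump of the first (unique) entry with that key.
def pvBumpA (k : String) : List (String × Int) → List (String × Int)
  | [] => []
  | (k', v) :: rest => if k' == k then (k', v + 1) :: rest else (k', v) :: pvBumpA k rest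

def pairwise_order_conservation (a : List Int) (b : List Int) : List (String × Int) :=
  let count0 : List (String × Int) := [("conserved", 0), ("identical", 0), ("not_conserved", 0)]
  (PySem.List.pyRange 0 (PySem.List.len a) 1).foldl (fun count i =>
    (PySem.List.pyRange 0 i 1).foldl (fun count j =>
      if PySem.List.pyGetD a i 0 == PySem.List.pyGetD a j 0 then pvBumpA "identical" count
      else if PySem.List.pyGetD a i 0 > PySem.List.pyGetD a j 0 then pvBumpA "conserved" count
      else pvBumpA "not_conserved" count) count) count0

-- ===== PORT B =====
-- Python's index-based merge loop is ported as the obvious structural recursion on the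
-- two remaining suffixes (len(left) - i = length of the remaining left suffix).
def pvMergeCount : List Int → List Int → List Int × Int
  | [], right => (right, 0)
  | x :: l, [] => (x :: l, 0)
  | x :: l, y :: r =>
    if y < x then
      let p := pvMergeCount (x :: l) r
      (y :: p.1, p.2 + ((x :: l).length : Int))
    else
      let p := pvMergeCount l (y :: r)
      (x :: p.1, p.2)

def pvSortCount (xs : List Int) : List Int × Int :=
  if h : xs.length ≤ 1 then (xs, 0)
  else
    let mid := xs.length / 2      -- n // 2 on a nonnegative n is Nat division
    let lres := pvSortCount (PySem.List.slice xs none (some (mid : Int)))      -- xs[:mid]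
    let rres := pvSortCount (PySem.List.slice xs (some (mid : Int)) none)      -- xs[mid:]
    let mres := pvMergeCount lres.1 rres.1
    (mres.1, lres.2 + rres.2 + mres.2)
termination_by xs.length
decreasing_by
  · simp only [PySem.List.slice_to_natCast, List.length_take]; omega
  · simp only [PySem.List.slice_from_natCast, List.length_drop]; omega

def pairwise_order_conservation_alt (a : List Int) (b : List Int) : List (String × Int) :=
  let st := a.foldl (fun (st : Int × PySem.Dict Int Int) x =>
      let c := st.2.getD x 0                    -- seen.get(x, 0)
      (st.1 + c, st.2.insert x (c + 1))) (0, PySem.Dict.empty)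
  let identical := st.1
  let n : Int := PySem.List.len a
  let not_conserved := (pvSortCount a).2
  let conserved := PySem.Int.floordiv (n * (n - 1)) 2 - identical - not_conserved
  [("conserved", conserved), ("identical", identical), ("not_conserved", not_conserved)]

-- ===== PRECONDITION & SPEC =====
def Spec_pairwise_order_conservation (a : List Int) (b : List Int) (out : List (String × Int)) : Prop := out = pairwise_order_conservation_alt a b
instance (a : List Int) (b : List Int) (out : List (String × Int)) : Decidable (Spec_pairwise_order_conservation a b out) := by unfold Spec_pairwise_order_conservation; infer_instance

-- ===== CLAIM (what is proved, stated in full; the proofs are below) =====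
def Claim_equal_pairwise_order_conservation : Prop := ∀ (a : List Int) (b : List Int), Dom_pairwise_order_conservation a b → Spec_pairwise_order_conservation a b (pairwise_order_conservation a b)

-- ===== LEMMAS AND PROOFS =====

def pvPairCnt (p : Int → Int → Bool) : List Int → Int
  | [] => 0
  | x :: xs => (xs.countP (p x) : Int) + pvPairCnt p xs

theorem pvPairCnt_append_singleton (p : Int → Int → Bool) (l : List Int) (x : Int) :
    pvPairCnt p (l ++ [x]) = pvPairCnt p l + (l.countP (fun y => p y x) : Int) := by
  induction l with
  | nil => simp [pvPairCnt]
  | cons z zs ih =>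
    simp only [List.cons_append, pvPairCnt, ih, List.countP_append, List.countP_cons,
      List.countP_nil]
    push_cast
    ring

theorem pvPairCnt_append (p : Int → Int → Bool) (u v : List Int) :
    pvPairCnt p (u ++ v) = pvPairCnt p u + pvPairCnt p v +
      ((u.map (fun x => (v.countP (p x) : Int))).sum) := by
  induction u with
  | nil => simp [pvPairCnt]
  | cons z zs ih =>
    simp only [List.cons_append, pvPairCnt, ih, List.countP_append, List.map_cons, List.sum_cons]
    push_cast
    ring

theorem pvSumSwap (p : Int → Int → Bool) (u v : List Int) :
    ((u.map (fun x => (v.countP (p x) : Int))).sum) =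
    ((v.map (fun y => (u.countP (fun x => p x y) : Int))).sum) := by
  induction u with
  | nil => simp
  | cons z zs ih =>
    simp only [List.map_cons, List.sum_cons, ih]
    clear ih
    induction v with
    | nil => simp
    | cons w ws ihv =>
      simp only [List.countP_cons, List.map_cons, List.sum_cons] at *
      push_cast
      push_cast at ihv
      by_cases h1 : p z w <;> simp [h1] at * <;> omega

theorem pvMergeCount_perm (l r : List Int) : (pvMergeCount l r).1.Perm (l ++ r) := by
  fun_induction pvMergeCount l r with
  | case1 r => simp
  | case2 x l => simp
  | case3 x l y r h p ih =>
    simp only [pvMergeCount, if_pos h]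
    refine List.Perm.trans (List.Perm.cons y ih) ?_
    exact (List.perm_middle).symm.trans (by simp)
  | case4 x l y r h p ih =>
    simp only [pvMergeCount, if_neg h]
    exact List.Perm.cons x ih

theorem mem_pvMergeCount (l r : List Int) (z : Int) (hz : z ∈ (pvMergeCount l r).1) :
    z ∈ l ∨ z ∈ r := by
  have := (pvMergeCount_perm l r).mem_iff.mp hz
  simpa using this

theorem pvMergeCount_sorted (l r : List Int)
    (hl : l.Pairwise (· ≤ ·)) (hr : r.Pairwise (· ≤ ·)) :
    (pvMergeCount l r).1.Pairwise (· ≤ ·) := by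
  fun_induction pvMergeCount l r with
  | case1 r => simpa
  | case2 x l => exact hl
  | case3 x l y r h p ih =>
    simp only []
    rw [List.pairwise_cons]
    refine ⟨?_, ih hl (List.Pairwise.sublist (List.sublist_cons_self y r) hr)⟩
    intro z hz
    rcases mem_pvMergeCount _ _ _ hz with hzl | hzr
    · rcases List.mem_cons.mp hzl with h1 | h1
      · omega
      · have := (List.pairwise_cons.mp hl).1 z h1; omega
    · exact (List.pairwise_cons.mp hr).1 z hzr
  | case4 x l y r h p ih =>
    rw [List.pairwise_cons]
    refine ⟨?_, ih (List.Pairwise.sublist (List.sublist_cons_self x l) hl) hr⟩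
    intro z hz
    rcases mem_pvMergeCount _ _ _ hz with hzl | hzr
    · exact (List.pairwise_cons.mp hl).1 z hzl
    · rcases List.mem_cons.mp hzr with h1 | h1
      · omega
      · have := (List.pairwise_cons.mp hr).1 z h1; omega

theorem pvMergeCount_cnt (l r : List Int)
    (hl : l.Pairwise (· ≤ ·)) (hr : r.Pairwise (· ≤ ·)) :
    (pvMergeCount l r).2 = ((r.map (fun y => (l.countP (fun x => decide (y < x)) : Int))).sum) := by
  fun_induction pvMergeCount l r with
  | case1 r => simp
  | case2 x l => simp
  | case3 x l y r h p ih =>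
    have hr' := List.Pairwise.sublist (List.sublist_cons_self y r) hr
    simp only [List.map_cons, List.sum_cons]
    rw [ih hl hr']
    have hcnt : (x :: l).countP (fun z => decide (y < z)) = (x :: l).length := by
      apply List.countP_eq_length.mpr
      intro z hz
      rcases List.mem_cons.mp hz with h1 | h1
      · simp [h1.symm ▸ h]
      · have := (List.pairwise_cons.mp hl).1 z h1
        simp; omega
    rw [hcnt]; ring
  | case4 x l y r h p ih =>
    have hl' := List.Pairwise.sublist (List.sublist_cons_self x l) hl
    rw [ih hl' hr]
    congr 1
    apply List.map_congr_left
    intro z hz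
    have hyz : y ≤ z := by
      rcases List.mem_cons.mp hz with h1 | h1
      · omega
      · exact (List.pairwise_cons.mp hr).1 z h1
    have hxz : ¬ z < x := by omega
    simp [List.countP_cons, hxz]

theorem pvSortCount_spec (xs : List Int) :
    (pvSortCount xs).1.Perm xs ∧ (pvSortCount xs).1.Pairwise (· ≤ ·) ∧
    (pvSortCount xs).2 = pvPairCnt (fun e l => decide (l < e)) xs := by
  fun_induction pvSortCount xs with
  | case1 xs h =>
    refine ⟨List.Perm.refl _, ?_, ?_⟩
    · match xs, h with
      | [], _ => simp
      | [x], _ => simp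
    · match xs, h with
      | [], _ => simp [pvPairCnt]
      | [x], _ => simp [pvPairCnt]
  | case2 xs h mid lres rres mres ih1 ih2 =>
    simp only [lres, rres, mres, PySem.List.slice_to_natCast, PySem.List.slice_from_natCast] at *
    clear lres rres mres
    obtain ⟨hlp, hls, hlc⟩ := ih1
    obtain ⟨hrp, hrs, hrc⟩ := ih2
    set L := (pvSortCount (List.take mid xs)).1 with hL
    set R := (pvSortCount (List.drop mid xs)).1 with hR
    have hperm : (pvMergeCount L R).1.Perm xs := by
      refine (pvMergeCount_perm L R).trans ?_
      refine (List.Perm.append hlp hrp).trans ?_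
      simp [List.take_append_drop]
    refine ⟨hperm, pvMergeCount_sorted _ _ hls hrs, ?_⟩
    have hcross := pvMergeCount_cnt L R hls hrs
    have hmapeq : (R.map (fun y => (L.countP (fun x => decide (y < x)) : Int))) =
        R.map (fun y => ((xs.take mid).countP (fun x => decide (y < x)) : Int)) := by
      apply List.map_congr_left
      intro y _
      rw [hlp.countP_eq]
    have hsum : (R.map (fun y => ((xs.take mid).countP (fun x => decide (y < x)) : Int))).sum =
        ((xs.drop mid).map (fun y => ((xs.take mid).countP (fun x => decide (y < x)) : Int))).sum :=
      List.Perm.sum_eq (hrp.map _)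
    have hx : xs = xs.take mid ++ xs.drop mid := (List.take_append_drop _ _).symm
    calc (pvSortCount (List.take mid xs)).2 + (pvSortCount (List.drop mid xs)).2 + (pvMergeCount L R).2
        = pvPairCnt (fun e l => decide (l < e)) (xs.take mid) +
          pvPairCnt (fun e l => decide (l < e)) (xs.drop mid) +
          (((xs.take mid).map (fun x => ((xs.drop mid).countP (fun y => decide (y < x)) : Int))).sum) := by
          rw [hlc, hrc, hcross, hmapeq, hsum, pvSumSwap]
      _ = pvPairCnt (fun e l => decide (l < e)) xs := by
          conv_rhs => rw [hx]
          rw [pvPairCnt_append]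

theorem pvCountCountP (p : List Int) (x : Int) :
    p.count x = p.countP (fun y => y == x) := by
  induction p with
  | nil => rfl
  | cons z zs ih => simp [List.count_cons, List.countP_cons, ih]

theorem pvIdFold (l : List Int) :
    ∀ (p : List Int) (acc : Int) (d : PySem.Dict Int Int),
      (∀ v, d.getD v 0 = (p.count v : Int)) →
      (l.foldl (fun (st : Int × PySem.Dict Int Int) x =>
        (st.1 + st.2.getD x 0, st.2.insert x (st.2.getD x 0 + 1))) (acc, d)).1 =
      acc + pvPairCnt (fun e l => e == l) (p ++ l) - pvPairCnt (fun e l => e == l) p := by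
  induction l with
  | nil => intro p acc d hd; simp
  | cons x xs ih =>
    intro p acc d hd
    simp only [List.foldl_cons]
    have hstep : ∀ v, (d.insert x (d.getD x 0 + 1)).getD v 0 = ((p ++ [x]).count v : Int) := by
      intro v
      rw [PySem.Dict.getD_insert]
      rcases eq_or_ne v x with hv | hv
      · rw [if_pos hv, hd x, hv, List.count_append, List.count_singleton]
        push_cast; simp
      · rw [if_neg hv, hd v, List.count_append, List.count_singleton]
        simpa using Ne.symm hv
    rw [ih (p ++ [x]) (acc + d.getD x 0) _ hstep]
    rw [hd x]
    have h1 : pvPairCnt (fun e l => e == l) (p ++ [x]) =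
        pvPairCnt (fun e l => e == l) p + (p.countP (fun y => y == x) : Int) :=
      pvPairCnt_append_singleton _ p x
    have h2 : p.count x = p.countP (fun y => y == x) := pvCountCountP p x
    have h3 : (p ++ [x]) ++ xs = p ++ x :: xs := by simp
    rw [h3] at *
    omega

theorem pvCnt3 (x : Int) (xs : List Int) :
    xs.countP (fun y => decide (x < y)) + xs.countP (fun y => x == y) +
      xs.countP (fun y => decide (y < x)) = xs.length := by
  induction xs with
  | nil => rfl
  | cons z zs ih =>
    simp only [List.countP_cons, List.length_cons]
    rcases lt_trichotomy x z with h | h | h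
    · simp [h, not_lt.mpr (le_of_lt h), (ne_of_lt h)]; omega
    · subst h; simp [lt_irrefl]; omega
    · simp [h, not_lt.mpr (le_of_lt h), (ne_of_gt h)]; omega

theorem pvTrichotomy (l : List Int) :
    pvPairCnt (fun e l => decide (e < l)) l + pvPairCnt (fun e l => e == l) l +
      pvPairCnt (fun e l => decide (l < e)) l = ((l.length * (l.length - 1) / 2 : Nat) : Int) := by
  induction l with
  | nil => rfl
  | cons x xs ih =>
    simp only [pvPairCnt, List.length_cons]
    have h3 := pvCnt3 x xs
    have hn : (xs.length + 1) * (xs.length + 1 - 1) / 2 = xs.length * (xs.length - 1) / 2 + xs.length := by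
      cases xs.length with
      | zero => rfl
      | succ m =>
        have he : (m + 1 + 1) * (m + 1 + 1 - 1) = (m + 1) * m + 2 * (m + 1) := by
          simp only [Nat.add_sub_cancel]; ring
        rw [he, Nat.add_mul_div_left _ _ (by norm_num : 0 < 2)]
        simp only [Nat.add_sub_cancel]
    rw [hn]
    omega

theorem pvRangeMapTake (a : List Int) : ∀ (n : Nat), n ≤ a.length →
    (PySem.List.pyRange 0 (n : Int) 1).map (fun j => PySem.List.pyGetD a j 0) = a.take n := by
  intro n
  induction n with
  | zero => intro _; simp [PySem.List.pyRange_one_eq_nil]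
  | succ m ih =>
    intro hm
    have h1 : PySem.List.pyRange 0 ((m : Int) + 1) 1 = PySem.List.pyRange 0 (m : Int) 1 ++ [(m : Int)] :=
      PySem.List.pyRange_one_succ_right (by positivity)
    push_cast
    rw [h1, List.map_append, ih (by omega)]
    have h2 : PySem.List.pyGetD a (m : Int) 0 = a[m]! := by
      rw [PySem.List.pyGetD_natCast]
      rw [List.getD_eq_getElem?_getD, getElem!_pos a m (by omega)]
      simp [List.getElem?_eq_getElem (by omega : m < a.length)]
    rw [List.take_succ]
    simp [h2, List.getElem?_eq_getElem (by omega : m < a.length), getElem!_pos a m (by omega)]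

theorem pvBump_conserved (c i0 nc : Int) :
    pvBumpA "conserved" [("conserved", c), ("identical", i0), ("not_conserved", nc)] =
    [("conserved", c + 1), ("identical", i0), ("not_conserved", nc)] := by
  simp [pvBumpA]

theorem pvBump_identical (c i0 nc : Int) :
    pvBumpA "identical" [("conserved", c), ("identical", i0), ("not_conserved", nc)] =
    [("conserved", c), ("identical", i0 + 1), ("not_conserved", nc)] := by
  simp [pvBumpA]

theorem pvBump_not_conserved (c i0 nc : Int) :
    pvBumpA "not_conserved" [("conserved", c), ("identical", i0), ("not_conserved", nc)] =
    [("conserved", c), ("identical", i0), ("not_conserved", nc + 1)] := by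
  simp [pvBumpA]

theorem pvInnerFold (ys : List Int) : ∀ (x c i0 nc : Int),
    ys.foldl (fun count y =>
      if x == y then pvBumpA "identical" count
      else if x > y then pvBumpA "conserved" count
      else pvBumpA "not_conserved" count)
      [("conserved", c), ("identical", i0), ("not_conserved", nc)] =
    [("conserved", c + (ys.countP (fun y => decide (y < x)) : Int)),
     ("identical", i0 + (ys.countP (fun y => x == y) : Int)),
     ("not_conserved", nc + (ys.countP (fun y => decide (x < y)) : Int))] := by
  induction ys with
  | nil => intro x c i0 nc; simp
  | cons y ys ih =>
    intro x c i0 nc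
    simp only [List.foldl_cons, List.countP_cons]
    rcases lt_trichotomy x y with h | h | h
    · have hne : (x == y) = false := by simp; omega
      have hgt : ¬ x > y := by omega
      have e1 : (decide (y < x)) = false := by simp; omega
      have e2 : (decide (x < y)) = true := by simp; omega
      rw [hne]
      simp only [Bool.false_eq_true, if_false, if_neg hgt, pvBump_not_conserved, ih,
        hne, e1, e2]
      simp only [List.cons.injEq, Prod.mk.injEq]
      and_intros <;> first | trivial | (push_cast; ring)
    · subst h
      have hne : (x == x) = true := by simp
      have e1 : (decide (x < x)) = false := by simp
      rw [hne]
      simp only [if_true, pvBump_identical, ih, hne, e1]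
      simp only [List.cons.injEq, Prod.mk.injEq]
      and_intros <;> first | trivial | (push_cast; ring)
    · have hne : (x == y) = false := by simp; omega
      have hgt : x > y := h
      have e1 : (decide (y < x)) = true := by simp; omega
      have e2 : (decide (x < y)) = false := by simp; omega
      rw [hne]
      simp only [Bool.false_eq_true, if_false, if_pos hgt, pvBump_conserved, ih,
        hne, e1, e2]
      simp only [List.cons.injEq, Prod.mk.injEq]
      and_intros <;> first | trivial | (push_cast; ring)

theorem pvOuterFold (a : List Int) : ∀ (n : Nat), n ≤ a.length →
    (PySem.List.pyRange 0 (n : Int) 1).foldl (fun count i =>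
      (PySem.List.pyRange 0 i 1).foldl (fun count j =>
        if PySem.List.pyGetD a i 0 == PySem.List.pyGetD a j 0 then pvBumpA "identical" count
        else if PySem.List.pyGetD a i 0 > PySem.List.pyGetD a j 0 then pvBumpA "conserved" count
        else pvBumpA "not_conserved" count) count)
      [("conserved", 0), ("identical", 0), ("not_conserved", 0)] =
    [("conserved", pvPairCnt (fun e l => decide (e < l)) (a.take n)),
     ("identical", pvPairCnt (fun e l => e == l) (a.take n)),
     ("not_conserved", pvPairCnt (fun e l => decide (l < e)) (a.take n))] := by
  intro n
  induction n with
  | zero => intro _; simp [PySem.List.pyRange_one_eq_nil, pvPairCnt]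
  | succ m ih =>
    intro hm
    have h1 : PySem.List.pyRange 0 ((m : Int) + 1) 1 = PySem.List.pyRange 0 (m : Int) 1 ++ [(m : Int)] :=
      PySem.List.pyRange_one_succ_right (by positivity)
    push_cast
    rw [h1, List.foldl_append, ih (by omega)]
    simp only [List.foldl_cons, List.foldl_nil]
    -- the inner fold at i = m is a fold over the values of a.take m
    have hmap := pvRangeMapTake a m (by omega)
    set x := PySem.List.pyGetD a (m : Int) 0 with hx
    have hinner : ∀ (d0 : List (String × Int)),
        (PySem.List.pyRange 0 (m : Int) 1).foldl (fun count j =>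
          if x == PySem.List.pyGetD a j 0 then pvBumpA "identical" count
          else if x > PySem.List.pyGetD a j 0 then pvBumpA "conserved" count
          else pvBumpA "not_conserved" count) d0 =
        (a.take m).foldl (fun count y =>
          if x == y then pvBumpA "identical" count
          else if x > y then pvBumpA "conserved" count
          else pvBumpA "not_conserved" count) d0 := by
      intro d0
      rw [← hmap, List.foldl_map]
    rw [hinner, pvInnerFold]
    have hxm : x = a[m]'(by omega) := by
      rw [hx, PySem.List.pyGetD_natCast, List.getD_eq_getElem?_getD,
        List.getElem?_eq_getElem (by omega : m < a.length)]
      rfl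
    have htake : a.take (m + 1) = a.take m ++ [a[m]'(by omega)] := by
      rw [List.take_add_one]
      simp [List.getElem?_eq_getElem (by omega : m < a.length)]
    rw [htake]
    simp only [pvPairCnt_append_singleton, List.cons.injEq, Prod.mk.injEq]
    refine ⟨⟨trivial, ?_⟩, ⟨trivial, ?_⟩, ⟨trivial, ?_⟩, trivial⟩
    · rw [hxm]
    · rw [hxm]
      congr 1
      simp only [Int.natCast_inj]
      apply List.countP_congr
      intro y _
      simp only [beq_iff_eq]
      exact eq_comm
    · rw [hxm]

-- ===== VERDICT (by name: the statement is the Claim_ definition above) =====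
theorem pairwise_order_conservation_spec : Claim_equal_pairwise_order_conservation := by
  intro a b _
  unfold Spec_pairwise_order_conservation
  unfold pairwise_order_conservation pairwise_order_conservation_alt
  simp only [PySem.List.len_eq]
  rw [pvOuterFold a a.length le_rfl, List.take_length]
  have hid : (a.foldl (fun (st : Int × PySem.Dict Int Int) x =>
      (st.1 + st.2.getD x 0, st.2.insert x (st.2.getD x 0 + 1))) (0, PySem.Dict.empty)).1 =
      pvPairCnt (fun e l => e == l) a := by
    have h0 : ∀ v : Int, (PySem.Dict.empty : PySem.Dict Int Int).getD v 0 = (([] : List Int).count v : Int) := by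
      intro v; simp [PySem.Dict.getD_empty]
    have := pvIdFold a [] 0 PySem.Dict.empty h0
    simpa [pvPairCnt] using this
  have hnc := (pvSortCount_spec a).2.2
  have htr := pvTrichotomy a
  have hfd : PySem.Int.floordiv ((a.length : Int) * ((a.length : Int) - 1)) 2 =
      ((a.length * (a.length - 1) / 2 : Nat) : Int) := by
    rw [PySem.Int.floordiv_eq_ediv_of_pos (by norm_num)]
    rcases Nat.eq_zero_or_pos a.length with hL | hL
    · rw [hL]; simp
    · obtain ⟨k, hL⟩ : ∃ k, a.length = k + 1 := ⟨a.length - 1, by omega⟩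
      rw [hL]
      have h1 : ((k + 1 : Nat) : Int) * (((k + 1 : Nat) : Int) - 1) = (((k + 1) * k : Nat) : Int) := by
        push_cast; ring
      have h2 : (k + 1) * (k + 1 - 1) = (k + 1) * k := by rw [Nat.add_sub_cancel]
      rw [h1, h2]
      generalize (k + 1) * k = t
      omega
  rw [hid, hnc, hfd]
  simp only [List.cons.injEq, Prod.mk.injEq]
  and_intros <;> first | trivial | omega
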